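-- pv_equiv track=rewrite | github.com/j-bernardi/pessimistic-agents | faithful/ints_to_str.py | int_to_bitstring
-- ===== SOURCE A (Python) =====
-- import math
--
-- def int_to_bitstring(n):
--     length = int(math.log2(n+1))
--     prev_cutoff = 2**length - 1
--     diff = n - prev_cutoff
--     no_lead_zeros = bin(diff)[2:]
--     if no_lead_zeros == '0':
--         no_lead_zeros = ''
--     lead_zeros = "".join(['0' for _ in range(length - len(no_lead_zeros))])
--     return lead_zeros + no_lead_zeros
-- ===== SOURCE B (Python) =====
-- def int_to_bitstring(n):
--     # n-th shortlex bitstring: the bits of n+1 with its leading 1 dropped,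
--     # collected by repeated halving (least significant bit first, prepended).
--     m = n + 1
--     bits = ''
--     while m > 1:
--         bits = ('1' if m % 2 else '0') + bits
--         m //= 2
--     return bits
-- ===== Notes on version B (the rewrite author's own statement) =====
-- stated objective: simpler
-- what changed: Replaces the logarithm/cutoff/difference/zero-padding pipeline with a single halving loop that prepends the low bits of the successor of n, stopping before its leading bit; Pre_ excludes negative n, on which A raises ValueError from math.log2 (B's loop there simply returns the empty string).
import Mathlib
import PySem

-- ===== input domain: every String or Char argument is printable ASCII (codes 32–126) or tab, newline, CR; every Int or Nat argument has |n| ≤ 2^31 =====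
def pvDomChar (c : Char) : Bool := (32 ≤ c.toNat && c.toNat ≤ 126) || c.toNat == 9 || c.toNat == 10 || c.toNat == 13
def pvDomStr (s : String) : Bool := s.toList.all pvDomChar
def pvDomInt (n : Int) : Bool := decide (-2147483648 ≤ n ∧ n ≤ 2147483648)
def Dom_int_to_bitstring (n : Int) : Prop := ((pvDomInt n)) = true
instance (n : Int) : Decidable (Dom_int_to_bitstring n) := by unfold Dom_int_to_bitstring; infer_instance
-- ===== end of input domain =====

-- B replaces A's log2/cutoff/difference/zero-padding pipeline with a single halving
-- loop that prepends the bits of n+1 and stops before the leading one; objective: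
-- simpler. Pre_ excludes negative n, where A raises ValueError.


-- ===== PORT A =====

-- binary digits of a positive number, most significant first (empty for zero);
-- helper for Python's bin(m)[2:]
def binCore : Nat → List Char
  | 0 => []
  | (m+1) => binCore ((m+1)/2) ++ [if (m+1) % 2 = 1 then '1' else '0']
decreasing_by exact Nat.div_lt_self (Nat.succ_pos m) (by omega)

-- bin(m)[2:] for nonnegative m (Python renders zero as '0')
def binChars (m : Nat) : List Char := if m = 0 then ['0'] else binCore m

def int_to_bitstring (n : Int) : String :=
  -- int(math.log2(n+1)); exact on the domain (|n| ≤ 2^31, so double precision suffices)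
  let length : Int := Int.ofNat (Nat.log2 ((n + 1).toNat))
  let prev_cutoff : Int := 2 ^ length.toNat - 1
  let diff : Int := n - prev_cutoff
  -- bin(diff)[2:]; diff is nonnegative whenever math.log2 succeeded (inside Pre_)
  let no_lead_zeros : List Char := binChars diff.toNat
  let no_lead_zeros : List Char := if no_lead_zeros = ['0'] then [] else no_lead_zeros
  -- "".join(['0' for _ in range(length - len(no_lead_zeros))]): empty for a negative count
  let lead_zeros : List Char := List.replicate (length - no_lead_zeros.length).toNat '0'
  String.mk (lead_zeros ++ no_lead_zeros)

-- ===== PORT B =====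

-- the while loop of B: while m > 1, prepend the current low bit and halve
def altLoop (m : Int) (bits : List Char) : List Char :=
  if m > 1 then altLoop (m / 2) ((if m % 2 = 1 then '1' else '0') :: bits) else bits
termination_by m.toNat
decreasing_by
  omega

def int_to_bitstring_alt (n : Int) : String :=
  String.mk (altLoop (n + 1) [])

-- ===== PRECONDITION & SPEC =====
-- Pre_ excludes exactly the negative n, on which A raises ValueError (math.log2 domain error).
def Pre_int_to_bitstring (n : Int) : Prop := 0 ≤ n
instance (n : Int) : Decidable (Pre_int_to_bitstring n) := by unfold Pre_int_to_bitstring; infer_instance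
def pvWitness_int_to_bitstring : Int := (6)

def Spec_int_to_bitstring (n : Int) (out : String) : Prop := out = int_to_bitstring_alt n
instance (n : Int) (out : String) : Decidable (Spec_int_to_bitstring n out) := by unfold Spec_int_to_bitstring; infer_instance

-- ===== CLAIM (what is proved, stated in full; the proofs are below) =====
def Claim_equal_int_to_bitstring : Prop := ∀ (n : Int), Dom_int_to_bitstring n → Pre_int_to_bitstring n → Spec_int_to_bitstring n (int_to_bitstring n)

-- ===== LEMMAS AND PROOFS =====

-- k low-order bits of d, most significant first, zero-padded to width k
def padBits : Nat → Nat → List Char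
  | 0, _ => []
  | (k+1), d => padBits k (d / 2) ++ [if d % 2 = 1 then '1' else '0']

theorem padBits_zero (k : Nat) : padBits k 0 = List.replicate k '0' := by
  induction k with
  | zero => rfl
  | succ k ih => simp [padBits, ih, List.replicate_succ']

theorem binCore_succ (d : Nat) (h : 0 < d) :
    binCore d = binCore (d / 2) ++ [if d % 2 = 1 then '1' else '0'] := by
  cases d with
  | zero => omega
  | succ m => rw [binCore]

theorem binCore_ne_nil (d : Nat) (h : 0 < d) : binCore d ≠ [] := by
  rw [binCore_succ d h]; simp

theorem binCore_head (d : Nat) (h : 0 < d) : (binCore d).head? = some '1' := by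
  induction d using Nat.strong_induction_on with
  | _ d ih =>
    rw [binCore_succ d h]
    by_cases h2 : d / 2 = 0
    · have hd1 : d = 1 := by omega
      subst hd1; simp [binCore]
    · rw [List.head?_append_of_ne_nil _ (binCore_ne_nil _ (by omega))]
      exact ih (d / 2) (Nat.div_lt_self h (by omega)) (by omega)

theorem binCore_ne_zero_lit (d : Nat) (h : 0 < d) : binCore d ≠ ['0'] := by
  intro hc
  have := binCore_head d h
  rw [hc] at this
  simp at this

theorem pad_eq_padBits (k d : Nat) (hpos : 0 < d) (hlt : d < 2 ^ k) :
    List.replicate (k - (binCore d).length) '0' ++ binCore d = padBits k d := by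
  induction k generalizing d with
  | zero => omega
  | succ k ih =>
    rw [binCore_succ d hpos]
    by_cases h2 : d / 2 = 0
    · have hd1 : d = 1 := by omega
      subst hd1
      simp [padBits, padBits_zero, binCore]
    · have hlt' : d / 2 < 2 ^ k := by
        have h2k : 2 ^ (k + 1) = 2 * 2 ^ k := by ring
        omega
      have hne := binCore_ne_nil (d / 2) (by omega)
      have hL : 0 < (binCore (d / 2)).length := List.length_pos_iff.mpr hne
      have hsub : k + 1 - (binCore (d / 2) ++ [if d % 2 = 1 then '1' else '0']).length
          = k - (binCore (d / 2)).length := by simp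
      rw [hsub, padBits, ← ih (d / 2) (by omega) hlt', List.append_assoc]

theorem binCore_eq (m : Nat) (h : 0 < m) :
    binCore m = '1' :: padBits (Nat.log2 m) (m - 2 ^ Nat.log2 m) := by
  induction m using Nat.strong_induction_on with
  | _ m ih =>
    by_cases h2 : m < 2
    · have hm1 : m = 1 := by omega
      subst hm1; simp [binCore]; decide
    · have hlog : Nat.log2 m = Nat.log2 (m / 2) + 1 := by
        rw [Nat.log2_def]; simp [show 2 ≤ m by omega]
      have hle : 2 ^ Nat.log2 (m / 2) ≤ m / 2 := Nat.log2_self_le (by omega)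
      set k := Nat.log2 (m / 2) with hk
      have hdm : m = 2 * (m / 2) + m % 2 := by omega
      have h2k : (2:Nat) ^ (k + 1) = 2 * 2 ^ k := by ring
      have hdiv : (m - 2 ^ (k + 1)) / 2 = m / 2 - 2 ^ k := by omega
      have hmod : (m - 2 ^ (k + 1)) % 2 = m % 2 := by omega
      rw [binCore_succ m (by omega), ih (m / 2) (Nat.div_lt_self (by omega) (by omega)) (by omega),
        hlog, padBits, hdiv, hmod]
      rw [List.cons_append]

theorem binChars_pos (m : Nat) (h : 0 < m) : binChars m = binCore m := by
  simp [binChars, show m ≠ 0 by omega]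

-- the B loop computes the tail of the binary expansion, appended to its accumulator
theorem altLoop_eq (m : Nat) (hm : 0 < m) (acc : List Char) :
    altLoop (m : Int) acc = (binCore m).tail ++ acc := by
  induction m using Nat.strong_induction_on generalizing acc with
  | _ m ih =>
    rw [altLoop]
    by_cases h2 : m < 2
    · have hm1 : m = 1 := by omega
      subst hm1
      simp [binCore]
    · have hmod : (m : Int) % 2 = ((m % 2 : Nat) : Int) := by push_cast; ring
      have hdiv : (m : Int) / 2 = ((m / 2 : Nat) : Int) := by
        omega
      have hgt : (m : Int) > 1 := by omega
      rw [if_pos hgt, hdiv,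
        ih (m / 2) (Nat.div_lt_self (by omega) (by omega)) (by omega)]
      have hne := binCore_ne_nil (m / 2) (by omega)
      rw [binCore_succ m (by omega)]
      obtain ⟨c, cs, hcs⟩ := List.exists_cons_of_ne_nil hne
      rw [hcs]
      have hbit : (if (m : Int) % 2 = 1 then '1' else '0')
          = (if m % 2 = 1 then '1' else '0') := by
        rw [hmod]
        by_cases hb : m % 2 = 1
        · simp [hb]
        · have : m % 2 = 0 := by omega
          simp [this]
      simp [hbit]

-- ===== VERDICT (by name: the statement is the Claim_ definition above) =====
theorem int_to_bitstring_spec : Claim_equal_int_to_bitstring := by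
  intro n _ hpre
  have hpre' : 0 ≤ n := hpre
  unfold Spec_int_to_bitstring
  simp only [int_to_bitstring, int_to_bitstring_alt]
  set m : Nat := (n + 1).toNat with hm
  have hmpos : 0 < m := by omega
  have hcast : (n + 1 : Int) = (m : Int) := by omega
  rw [hcast, altLoop_eq m hmpos, binCore_eq m hmpos]
  set k : Nat := Nat.log2 m with hk
  have hle : 2 ^ k ≤ m := Nat.log2_self_le (by omega)
  have hlt : m < 2 ^ (k + 1) := Nat.lt_log2_self
  have h2k : (2:Nat) ^ (k + 1) = 2 * 2 ^ k := by ring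
  set d : Nat := m - 2 ^ k with hd
  have hdlt : d < 2 ^ k := by omega
  -- A side: the Int arithmetic
  have hkt : (Int.ofNat k).toNat = k := by simp
  rw [hkt]
  have hne : n - ((2:Int) ^ k - 1) = (d : Int) := by
    have hcast2 : ((2:Int) ^ k) = ((2 ^ k : Nat) : Int) := by push_cast; ring
    rw [hcast2]; omega
  rw [hne, Int.toNat_natCast]
  clear_value d
  by_cases hd0 : d = 0
  · subst hd0
    simp [binChars, padBits_zero]
  · rw [binChars_pos d (by omega),
      if_neg (binCore_ne_zero_lit d (by omega))]
    have hlen : ((Int.ofNat k : Int) - ((binCore d).length : Int)).toNat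
        = k - (binCore d).length := by simp
    rw [hlen, pad_eq_padBits k d (by omega) hdlt]
    simp
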